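-- pv_equiv track=rewrite | github.com/KornelJahn/advent-of-code-2023 | src/aoc2023/day12.py | count_groups_of_1
-- ===== SOURCE A (Python) =====
-- def count_groups_of_1(bits):
--     groups = []
--     cnt = 0
--     while bits:
--         lsb = bits & 1
--         if lsb:
--             cnt += 1
--         else:
--             if cnt > 0:
--                 groups.append(cnt)
--             cnt = 0
--         bits >>= 1
--     if cnt > 0:
--         groups.append(cnt)
--     return groups
-- ===== SOURCE B (Python) =====
-- def count_groups_of_1(bits):
--     return [len(p) for p in bin(bits)[2:].split('0') if p][::-1]
-- ===== Notes on version B (the rewrite author's own statement) =====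
-- stated objective: idiomatic
-- what changed: Replaces the per-bit accumulator while-loop with a one-liner that renders the number as a binary string, splits it on '0', keeps the lengths of the non-empty pieces and reverses them (MSB-first string vs LSB-first runs).
import Mathlib
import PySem

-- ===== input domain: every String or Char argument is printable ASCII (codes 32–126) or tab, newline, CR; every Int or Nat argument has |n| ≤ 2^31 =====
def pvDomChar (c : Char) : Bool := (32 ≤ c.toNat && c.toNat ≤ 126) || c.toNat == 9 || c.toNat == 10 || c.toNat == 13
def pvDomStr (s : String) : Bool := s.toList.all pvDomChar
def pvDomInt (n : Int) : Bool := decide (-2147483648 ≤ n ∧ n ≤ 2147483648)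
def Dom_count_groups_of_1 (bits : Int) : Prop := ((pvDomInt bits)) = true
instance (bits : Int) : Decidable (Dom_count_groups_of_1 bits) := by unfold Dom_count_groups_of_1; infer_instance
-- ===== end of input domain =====

-- B replaces A's per-bit accumulator loop by rendering the number as a binary string,
-- splitting it on '0', taking the non-empty piece lengths and reversing (idiomatic; same cost).


-- ===== PORT A =====
-- the `while bits:` loop; on bits < 0 Python diverges, the port stops there (totalisation guard;
-- such inputs are outside Pre_)
def cgLoop (bits : Int) (groups : List Int) (cnt : Int) : List Int :=
  if _h : bits ≤ 0 then (if cnt > 0 then groups ++ [cnt] else groups)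
  else
    let lsb := PySem.Int.band bits 1
    if lsb ≠ 0 then cgLoop (bits >>> (1 : Nat)) groups (cnt + 1)
    else cgLoop (bits >>> (1 : Nat)) (if cnt > 0 then groups ++ [cnt] else groups) 0
termination_by bits.toNat
decreasing_by
  all_goals
    simp only [Int.shiftRight_eq_div_pow, pow_one]
    omega

def count_groups_of_1 (bits : Int) : List Int := cgLoop bits [] 0

-- ===== PORT B =====
-- hand port of bin(bits)[2:] (exact for bits ≥ 0; negatives are outside Pre_)
def binCharsAux (bits : Int) (acc : List Char) : List Char :=
  if _h : bits ≤ 0 then acc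
  else binCharsAux (bits >>> (1 : Nat))
        ((if PySem.Int.band bits 1 = 1 then '1' else '0') :: acc)
termination_by bits.toNat
decreasing_by
  simp only [Int.shiftRight_eq_div_pow, pow_one]
  omega

def binChars (bits : Int) : List Char :=
  if bits = 0 then ['0'] else binCharsAux bits []

-- hand port of str.split('0') over the character list (exact: keeps empty pieces)
def splitC : List Char → List (List Char)
  | [] => [[]]
  | c :: rest =>
    match splitC rest with
    | [] => [[]]  -- unreachable: splitC never returns []
    | h :: tl => if c = '0' then [] :: h :: tl else (c :: h) :: tl

def count_groups_of_1_alt (bits : Int) : List Int :=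
  (((splitC (binChars bits)).filter (fun p => p ≠ [])).map
      (fun p => (p.length : Int))).reverse

-- ===== PRECONDITION & SPEC =====
-- Pre_ excludes bits < 0, on which the Python A's `while bits:` loop never terminates.
def Pre_count_groups_of_1 (bits : Int) : Prop := 0 ≤ bits
instance (bits : Int) : Decidable (Pre_count_groups_of_1 bits) := by
  unfold Pre_count_groups_of_1; infer_instance
def pvWitness_count_groups_of_1 : Int := (22)

def Spec_count_groups_of_1 (bits : Int) (out : List Int) : Prop := out = count_groups_of_1_alt bits
instance (bits : Int) (out : List Int) : Decidable (Spec_count_groups_of_1 bits out) := by unfold Spec_count_groups_of_1; infer_instance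

-- ===== CLAIM (what is proved, stated in full; the proofs are below) =====
def Claim_equal_count_groups_of_1 : Prop := ∀ (bits : Int), Dom_count_groups_of_1 bits → Pre_count_groups_of_1 bits → Spec_count_groups_of_1 bits (count_groups_of_1 bits)

-- ===== LEMMAS AND PROOFS =====

-- the non-empty piece lengths of a character list
def pvP (s : List Char) : List Int :=
  ((splitC s).filter (fun p => p ≠ [])).map (fun p => (p.length : Int))

-- MSB-first binary digits of a Nat, empty for 0
def binDigitsN : Nat → List Char
  | 0 => []
  | n + 1 => binDigitsN ((n + 1) / 2) ++ [if (n + 1) % 2 = 1 then '1' else '0']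
decreasing_by omega

theorem splitC_ne_nil (s : List Char) : splitC s ≠ [] := by
  cases s with
  | nil => simp [splitC]
  | cons c rest =>
    cases hs : splitC rest with
    | nil => simp [splitC, hs]
    | cons h tl =>
      simp only [splitC, hs]
      split <;> simp

theorem splitC_append_zero (s t : List Char) :
    splitC (s ++ '0' :: t) = splitC s ++ splitC t := by
  induction s with
  | nil =>
    cases ht : splitC t with
    | nil => exact absurd ht (splitC_ne_nil t)
    | cons h tl => simp [splitC, ht]
  | cons c s ih =>
    cases hs : splitC s with
    | nil => exact absurd hs (splitC_ne_nil s)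
    | cons h tl =>
      simp only [List.cons_append, splitC, ih, hs]
      split <;> simp

theorem splitC_replicate_one (k : Nat) :
    splitC (List.replicate k '1') = [List.replicate k '1'] := by
  induction k with
  | zero => simp [splitC]
  | succ k ih => simp [List.replicate_succ, splitC, ih]

theorem pvP_append_zero (s t : List Char) : pvP (s ++ '0' :: t) = pvP s ++ pvP t := by
  simp [pvP, splitC_append_zero]

theorem pvP_replicate (k : Nat) :
    pvP (List.replicate k '1') = if k = 0 then [] else [(k : Int)] := by
  cases k with
  | zero => simp [pvP, splitC]
  | succ k => simp [pvP, splitC_replicate_one]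

theorem band_one_natCast (n : Nat) : PySem.Int.band (n : Int) 1 = ((n % 2 : Nat) : Int) := by
  have h := PySem.Int.band_natCast n 1
  simpa [Nat.and_one_is_mod] using h

theorem shiftRight_one_natCast (n : Nat) : ((n : Int)) >>> (1 : Nat) = ((n / 2 : Nat) : Int) := by
  simp [Int.shiftRight_eq_div_pow]

theorem binDigitsN_succ (n : Nat) (h : n ≠ 0) :
    binDigitsN n = binDigitsN (n / 2) ++ [if n % 2 = 1 then '1' else '0'] := by
  cases n with
  | zero => exact absurd rfl h
  | succ m => rw [binDigitsN]

theorem cgLoop_eq (n : Nat) (groups : List Int) (cnt : Nat) :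
    cgLoop (n : Int) groups (cnt : Int) =
      groups ++ (pvP (binDigitsN n ++ List.replicate cnt '1')).reverse := by
  induction n using Nat.strong_induction_on generalizing groups cnt with
  | _ n ih =>
    rw [cgLoop]
    by_cases h0 : n = 0
    · subst h0
      simp only [Nat.cast_zero, binDigitsN, List.nil_append, pvP_replicate]
      rw [dif_pos (by omega : (0:Int) ≤ 0)]
      cases hc : cnt with
      | zero => simp
      | succ m => simp
    · rw [dif_neg (by omega : ¬ ((n : Int) ≤ 0))]
      simp only [band_one_natCast, shiftRight_one_natCast]
      rw [binDigitsN_succ n h0]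
      by_cases hodd : n % 2 = 1
      · rw [if_pos (by omega : ¬ (((n % 2 : Nat) : Int) = 0))]
        have hcast : ((cnt : Int) + 1) = ((cnt + 1 : Nat) : Int) := by push_cast; ring
        rw [hcast, ih (n / 2) (by omega) groups (cnt + 1)]
        simp [hodd, List.replicate_succ, List.append_assoc]
      · have heven : n % 2 = 0 := by omega
        rw [if_neg (by omega : ¬ ¬ (((n % 2 : Nat) : Int) = 0))]
        rw [show (0 : Int) = ((0 : Nat) : Int) from rfl, ih (n / 2) (by omega) _ 0]
        rw [List.append_assoc]
        simp only [heven, Nat.zero_ne_one, if_false, List.replicate_zero, List.append_nil,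
          List.singleton_append, pvP_append_zero, pvP_replicate, List.reverse_append]
        cases hc : cnt with
        | zero => simp
        | succ m => simp

theorem binCharsAux_eq (n : Nat) (acc : List Char) :
    binCharsAux (n : Int) acc = binDigitsN n ++ acc := by
  induction n using Nat.strong_induction_on generalizing acc with
  | _ n ih =>
    rw [binCharsAux]
    by_cases h0 : n = 0
    · subst h0
      rw [dif_pos (by omega : ((0:Nat) : Int) ≤ 0)]
      simp [binDigitsN]
    · rw [dif_neg (by omega : ¬ ((n : Int) ≤ 0))]
      simp only [band_one_natCast, shiftRight_one_natCast]
      rw [ih (n / 2) (by omega), binDigitsN_succ n h0, List.append_assoc]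
      by_cases hodd : n % 2 = 1
      · rw [if_pos (by omega : (((n % 2 : Nat) : Int) = 1))]
        simp [hodd]
      · rw [if_neg (by omega : ¬ (((n % 2 : Nat) : Int) = 1))]
        have h2 : n % 2 = 0 := by omega
        simp [h2]

-- ===== VERDICT (by name: the statement is the Claim_ definition above) =====
theorem count_groups_of_1_spec : Claim_equal_count_groups_of_1 := by
  intro bits _hdom hpre
  have hn : bits = ((bits.toNat : Nat) : Int) := by
    unfold Pre_count_groups_of_1 at hpre; omega
  have hA : cgLoop ((bits.toNat : Nat) : Int) [] 0 =
      (pvP (binDigitsN bits.toNat)).reverse := by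
    have := cgLoop_eq bits.toNat [] 0
    simpa using this
  unfold Spec_count_groups_of_1 count_groups_of_1 count_groups_of_1_alt binChars
  rw [hn, hA]
  by_cases hz : bits.toNat = 0
  · rw [if_pos (by omega : ((bits.toNat : Nat) : Int) = 0)]
    simp [hz, binDigitsN, pvP, splitC]
  · rw [if_neg (by omega : ¬ ((bits.toNat : Nat) : Int) = 0), binCharsAux_eq]
    simp [pvP]
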